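-- pv_equiv track=rewrite | github.com/AnatoliiPerfun/python | main.py | seat_at_tables
-- ===== SOURCE A (Python) =====
-- def seat_at_tables(group):
--     big_table = 3
--     big_fit = 6
--     small_table = 3
--     small_fit = 4
--
--     possible = ()
--
--     for i in range(big_table + 1):
--         for j in range(small_table + 1):
--             possible += (i*big_fit + j*small_fit,  )
--     return group in possible
-- ===== SOURCE B (Python) =====
-- def seat_at_tables(group):
--     for i in range(4):
--         rem = group - 6 * i
--         if rem >= 0 and rem % 4 == 0 and rem // 4 <= 3:
--             return True
--     return False
-- ===== Notes on version B (the rewrite author's own statement) =====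
-- stated objective: simpler
-- what changed: Replaces the nested double loop that enumerates every possible table sum into a tuple and then scans it by membership with a single short loop over the big-table count, using a divisibility-and-bounds check on the remainder.
import Mathlib
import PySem

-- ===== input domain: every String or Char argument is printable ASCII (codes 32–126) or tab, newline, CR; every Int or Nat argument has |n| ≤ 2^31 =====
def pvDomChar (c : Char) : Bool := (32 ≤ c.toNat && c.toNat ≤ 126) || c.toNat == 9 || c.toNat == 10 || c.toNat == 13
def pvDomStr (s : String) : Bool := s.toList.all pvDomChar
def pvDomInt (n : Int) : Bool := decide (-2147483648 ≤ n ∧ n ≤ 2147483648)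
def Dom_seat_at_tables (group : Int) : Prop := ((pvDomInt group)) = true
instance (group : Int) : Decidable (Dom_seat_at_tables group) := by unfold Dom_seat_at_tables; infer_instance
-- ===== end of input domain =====

-- B replaces A's enumerate-all-16-sums-then-scan with a 4-step divisibility check: simpler.
-- ===== PORT A =====
def seat_at_tables (group : Int) : Bool :=
  -- big_table = 3, big_fit = 6, small_table = 3, small_fit = 4
  let possible : List Int :=
    (PySem.List.pyRange 0 (3 + 1) 1).foldl (fun acc i =>
      (PySem.List.pyRange 0 (3 + 1) 1).foldl (fun acc2 j =>
        acc2 ++ [i * 6 + j * 4]) acc) []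
  possible.contains group

-- ===== PORT B =====
def seat_at_tables_alt (group : Int) : Bool :=
  (PySem.List.pyRange 0 4 1).any (fun i =>
    let rem := group - 6 * i
    decide (0 ≤ rem) && decide (PySem.Int.mod rem 4 = 0) && decide (PySem.Int.floordiv rem 4 ≤ 3))

-- ===== PRECONDITION & SPEC =====
def Spec_seat_at_tables (group : Int) (out : Bool) : Prop := out = seat_at_tables_alt group
instance (group : Int) (out : Bool) : Decidable (Spec_seat_at_tables group out) := by unfold Spec_seat_at_tables; infer_instance

-- ===== CLAIM (what is proved, stated in full; the proofs are below) =====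
def Claim_equal_seat_at_tables : Prop := ∀ (group : Int), Dom_seat_at_tables group → Spec_seat_at_tables group (seat_at_tables group)

-- ===== LEMMAS AND PROOFS =====

-- ===== VERDICT (by name: the statement is the Claim_ definition above) =====
theorem seat_at_tables_spec : Claim_equal_seat_at_tables := by
  intro group _
  unfold Spec_seat_at_tables seat_at_tables seat_at_tables_alt
  apply Bool.eq_iff_iff.mpr
  simp only [show PySem.List.pyRange 0 4 1 = [0, 1, 2, 3] from by decide,
    show PySem.List.pyRange 0 (3 + 1) 1 = [0, 1, 2, 3] from by decide]
  simp only [PySem.Int.mod_eq_emod_of_pos (by norm_num : (0:Int) < 4),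
    PySem.Int.floordiv_eq_ediv_of_pos (by norm_num : (0:Int) < 4)]
  simp [List.foldl]
  constructor <;> intro h <;> [skip; skip] <;> omega
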